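-- pv_equiv track=rewrite | github.com/renemoll/advent_of_code | 2024/days/day_01.py | _part2
-- ===== SOURCE A (Python) =====
-- import collections
--
-- def _part2(parsed_input) -> int:
--     left, right = parsed_input
--     left_count = collections.Counter(left)
--     right_count = collections.Counter(right)
--     return sum(
--         number * left_count[number] * right_count[number]
--         for number in left_count.elements()
--     )
-- ===== SOURCE B (Python) =====
-- import collections
--
-- def _part2(parsed_input) -> int:
--     left, right = parsed_input
--     left_count = collections.Counter(left)
--     right_count = collections.Counter(right)
--     return sum(
--         number * count * count * right_count[number]
--         for number, count in left_count.items()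
--     )
-- ===== Notes on version B (the rewrite author's own statement) =====
-- stated objective: alternative
-- what changed: Instead of re-expanding left_count.elements() (one term per occurrence in left), B makes a single pass over left_count.items(), folding the multiplicity into the formula n*c*c*right_count[n], so the sum has one term per distinct key.
import Mathlib
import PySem

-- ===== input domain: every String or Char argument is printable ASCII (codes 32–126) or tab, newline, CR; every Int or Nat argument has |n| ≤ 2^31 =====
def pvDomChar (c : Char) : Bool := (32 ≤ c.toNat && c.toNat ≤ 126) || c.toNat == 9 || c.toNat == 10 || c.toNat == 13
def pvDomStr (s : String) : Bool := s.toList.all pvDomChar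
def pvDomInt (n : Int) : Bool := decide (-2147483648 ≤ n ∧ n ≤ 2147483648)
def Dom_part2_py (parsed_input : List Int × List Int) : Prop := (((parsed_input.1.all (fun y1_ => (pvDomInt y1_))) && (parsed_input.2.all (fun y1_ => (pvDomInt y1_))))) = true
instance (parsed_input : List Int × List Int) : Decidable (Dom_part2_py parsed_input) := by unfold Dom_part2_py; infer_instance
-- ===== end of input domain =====

-- B sums once over the distinct keys of left_count with the multiplicity folded into the
-- formula n*c*c*right_count[n], instead of A's re-expansion of left_count.elements().

-- ===== PORT A =====
-- Counter.elements(): each key repeated its count times, in first-insertion order.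
-- Exact for counters built from a list (all counts are positive integers).
def pyElements (d : PySem.Dict Int Int) : List Int :=
  d.items.flatMap (fun kc => List.replicate kc.2.toNat kc.1)

def part2_py (parsed_input : List Int × List Int) : Int :=
  let left := parsed_input.1
  let right := parsed_input.2
  let left_count := PySem.Dict.counter left
  let right_count := PySem.Dict.counter right
  (pyElements left_count).foldl
    (fun acc number => acc + number * left_count.getD number 0 * right_count.getD number 0) 0

-- ===== PORT B =====
def part2_py_alt (parsed_input : List Int × List Int) : Int :=
  let left := parsed_input.1
  let right := parsed_input.2
  let left_count := PySem.Dict.counter left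
  let right_count := PySem.Dict.counter right
  left_count.items.foldl
    (fun acc nc => acc + nc.1 * nc.2 * nc.2 * right_count.getD nc.1 0) 0

-- ===== PRECONDITION & SPEC =====
def Spec_part2_py (parsed_input : List Int × List Int) (out : Int) : Prop := out = part2_py_alt parsed_input
instance (parsed_input : List Int × List Int) (out : Int) : Decidable (Spec_part2_py parsed_input out) := by unfold Spec_part2_py; infer_instance

-- ===== CLAIM (what is proved, stated in full; the proofs are below) =====
def Claim_equal_part2_py : Prop := ∀ (parsed_input : List Int × List Int), Dom_part2_py parsed_input → Spec_part2_py parsed_input (part2_py parsed_input)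

-- ===== LEMMAS AND PROOFS =====

theorem foldl_add_map {α : Type} (f : α → Int) (xs : List α) (i : Int) :
    xs.foldl (fun acc x => acc + f x) i = i + (xs.map f).sum := by
  induction xs generalizing i with
  | nil => simp
  | cons x t ih => simp [List.foldl, ih (i + f x)]; ring

theorem sum_map_flatMap_replicate (ks : List Int) (f : Int → Int) (g : Int → Nat) :
    ((ks.flatMap (fun k => List.replicate (g k) k)).map f).sum
      = (ks.map (fun k => (g k : Int) * f k)).sum := by
  induction ks with
  | nil => simp
  | cons k t ih =>
    simp [List.flatMap_cons, List.map_append, List.sum_append, ih,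
      List.map_replicate, List.sum_replicate]

theorem part2_py_spec : Claim_equal_part2_py := by
  intro p _
  unfold Spec_part2_py part2_py part2_py_alt pyElements
  simp only [foldl_add_map, zero_add, PySem.Dict.items_counter, List.flatMap_map,
    List.map_map, Function.comp_def]
  rw [sum_map_flatMap_replicate (PySem.Set.ofList p.1)
    (fun k => k * (PySem.Dict.counter p.1).getD k 0 * (PySem.Dict.counter p.2).getD k 0)
    (fun k => ((p.1.count k : Int)).toNat)]
  apply congrArg List.sum
  apply List.map_congr_left
  intro k _
  simp only [PySem.Dict.getD_counter]
  rw [Int.toNat_of_nonneg (by exact_mod_cast Nat.zero_le _ : (0:Int) ≤ (p.1.count k : Int))]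
  ring
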